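-- pv_equiv track=rewrite | github.com/Gaudeval/accordion-acetone | src/acetone/layers.py | indices_of
-- ===== SOURCE A (Python) =====
-- import operator
-- from functools import reduce
--
-- def volume_of(shape: tuple[int, ...]) -> int:
--     """Returns the number of elements in an array."""
--     if any(s <= 0 for s in shape):
--         raise ValueError(f"Invalid array shape {shape}.")
--     return reduce(operator.mul, shape, 1)
--
-- def indices_of(index: int, shape: tuple[int, ...]) -> tuple[int, ...]:
--     """Returns the indices of an element in the N-D array."""
--     # Check index is in array bounds
--     if all(s > 0 for s in shape) and index >= volume_of(shape):
--         raise ValueError(f"Invalid index {index} for array of shape {shape} ({volume_of(shape)} elements).")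
--     # Compute the indices of element index (assuming a C-like, row-major layout)
--     # dim[i] = floor((index % (shape[i] * ... * shape[0])) / (shape[i-1] * ... * shape[0]))
--     # - Remove dimensions [shape[0]]...[shape[i-1]], account only for shape[i] * ... * shape[N] elements
--     # - Remove dimensions [shape[i+1]]...[shape[N]], each step in i steps over shape[i+1] * ... * shape[N] elements
--     indices: list[int] = [0 for _ in shape]
--     rem: int = volume_of(shape)
--     for i in range(len(shape)):
--         indices[i] = index % rem
--         rem = rem // shape[i]
--         indices[i] = indices[i] // rem
--     return tuple(indices)
-- ===== SOURCE B (Python) =====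
-- import operator
-- from functools import reduce
--
-- def volume_of(shape):
--     """Returns the number of elements in an array."""
--     if any(s <= 0 for s in shape):
--         raise ValueError(f"Invalid array shape {shape}.")
--     return reduce(operator.mul, shape, 1)
--
-- def indices_of(index, shape):
--     """Returns the indices of an element in the N-D array (row-major)."""
--     if all(s > 0 for s in shape) and index >= volume_of(shape):
--         raise ValueError(f"Invalid index {index} for array of shape {shape} ({volume_of(shape)} elements).")
--     volume_of(shape)  # validate the shape (ValueError on any non-positive dimension)
--     # Row-major strides: one backward accumulation pass, then one direct read per axis.
--     strides = []
--     acc = 1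
--     for s in reversed(shape):
--         strides.append(acc)
--         acc *= s
--     strides.reverse()
--     return tuple((index // t) % s for s, t in zip(shape, strides))
-- ===== Notes on version B (the rewrite author's own statement) =====
-- stated objective: idiomatic
-- what changed: A recomputes each coordinate from a shrinking remainder volume via index % rem then // rem inside one stateful loop; B first builds the row-major strides table (suffix products) in a backward pass and then reads each coordinate independently as (index // stride) % extent.
import Mathlib
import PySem

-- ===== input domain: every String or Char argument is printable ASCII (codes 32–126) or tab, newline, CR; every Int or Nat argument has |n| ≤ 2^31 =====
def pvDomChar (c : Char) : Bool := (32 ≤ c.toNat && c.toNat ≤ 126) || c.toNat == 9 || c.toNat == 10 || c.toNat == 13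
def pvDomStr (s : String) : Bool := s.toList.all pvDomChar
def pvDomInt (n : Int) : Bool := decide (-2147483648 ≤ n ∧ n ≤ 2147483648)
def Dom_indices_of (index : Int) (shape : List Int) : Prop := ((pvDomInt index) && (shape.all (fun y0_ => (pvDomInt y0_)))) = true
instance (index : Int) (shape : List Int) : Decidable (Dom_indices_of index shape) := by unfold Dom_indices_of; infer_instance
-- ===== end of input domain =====

-- B replaces A's stateful shrinking-remainder loop by a strides table (suffix products,
-- one backward pass) and an independent (index // stride) % extent read per axis (objective: idiomatic).

-- ===== PORT A =====
def volume_of (shape : List Int) : Int := shape.foldl (· * ·) 1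

def indices_of (index : Int) (shape : List Int) : List Int :=
  -- the ValueError branches (some s ≤ 0, or index ≥ volume) are excluded by Pre_indices_of
  ((PySem.List.pyRange 0 (shape.length : Int) 1).foldl
    (fun (st : List Int × Int) i =>
      let v := PySem.Int.mod index st.2
      let rem' := PySem.Int.floordiv st.2 (PySem.List.pyGetD shape i 0)
      (st.1.set i.toNat (PySem.Int.floordiv v rem'), rem'))
    (shape.map (fun _ => (0 : Int)), volume_of shape)).1

-- ===== PORT B =====
def indices_of_alt (index : Int) (shape : List Int) : List Int :=
  -- the bounds/shape check raises exactly where A's does; excluded by Pre_indices_of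
  let acc := shape.reverse.foldl
    (fun (st : List Int × Int) s => (st.1 ++ [st.2], st.2 * s)) ([], 1)
  let strides := acc.1.reverse
  (shape.zip strides).map (fun p => PySem.Int.mod (PySem.Int.floordiv index p.2) p.1)

-- ===== PRECONDITION & SPEC =====
-- Pre_ is exactly A's non-raising domain: every dimension positive (else volume_of raises
-- ValueError) and index below the number of elements (else the bounds check raises ValueError).
def Pre_indices_of (index : Int) (shape : List Int) : Prop :=
  (∀ s ∈ shape, 0 < s) ∧ index < shape.prod
instance (index : Int) (shape : List Int) : Decidable (Pre_indices_of index shape) := by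
  unfold Pre_indices_of; infer_instance

def pvWitness_indices_of : Int × List Int := (5, [2, 3, 4])

def Spec_indices_of (index : Int) (shape : List Int) (out : List Int) : Prop := out = indices_of_alt index shape
instance (index : Int) (shape : List Int) (out : List Int) : Decidable (Spec_indices_of index shape out) := by unfold Spec_indices_of; infer_instance

-- ===== CLAIM (what is proved, stated in full; the proofs are below) =====
def Claim_equal_indices_of : Prop := ∀ (index : Int) (shape : List Int), Dom_indices_of index shape → Pre_indices_of index shape → Spec_indices_of index shape (indices_of index shape)

-- ===== LEMMAS AND PROOFS =====

-- recursive characterisation of A's loop: same remainder-volume state, one step per axis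
def gA (index : Int) : List Int → Int → List Int
  | [], _ => []
  | s :: rest, rem =>
    let v := PySem.Int.mod index rem
    let rem' := PySem.Int.floordiv rem s
    PySem.Int.floordiv v rem' :: gA index rest rem'

theorem pv_key (i s P : Int) (hs : 0 < s) (hP : 0 < P) :
    (i % (s * P)) / P = (i / P) % s := by
  have hr0 : 0 ≤ i % P := Int.emod_nonneg i (by omega)
  have hr1 : i % P < P := Int.emod_lt_of_pos i hP
  have ha0 : 0 ≤ i / P % s := Int.emod_nonneg _ (by omega)
  have ha1 : i / P % s < s := Int.emod_lt_of_pos _ hs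
  have h1 : i % (s * P) = P * (i / P % s) + i % P := by
    conv_lhs => rw [← Int.mul_ediv_add_emod i P, ← Int.mul_ediv_add_emod (i / P) s]
    have h2 : P * (s * (i / P / s) + i / P % s) + i % P
        = (P * (i / P % s) + i % P) + (i / P / s) * (s * P) := by ring
    rw [h2, Int.add_mul_emod_self_right]
    exact Int.emod_eq_of_lt (by positivity) (by nlinarith)
  rw [h1]
  have h3 : P * (i / P % s) + i % P = i % P + (i / P % s) * P := by ring
  rw [h3, Int.add_mul_ediv_right _ _ (by omega : P ≠ 0),
      Int.ediv_eq_zero_of_lt hr0 hr1, zero_add]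

theorem pv_take_set (l : List Int) (k : Nat) (v : Int) (h : k < l.length) :
    (l.set k v).take (k + 1) = l.take k ++ [v] := by
  rw [List.set_eq_take_append_cons_drop, if_pos h, List.take_append]
  simp [List.take_take, List.length_take, Nat.min_eq_left (Nat.le_of_lt h)]

-- A's imperative loop, generalised over the already-filled prefix
theorem pv_loopA (index : Int) (shape : List Int) :
    ∀ (suf : List Int) (k : Nat) (cur : List Int) (rem : Int),
    shape.drop k = suf → cur.length = shape.length →
    ((PySem.List.pyRange (k : Int) (shape.length : Int) 1).foldl
      (fun (st : List Int × Int) i =>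
        let v := PySem.Int.mod index st.2
        let rem' := PySem.Int.floordiv st.2 (PySem.List.pyGetD shape i 0)
        (st.1.set i.toNat (PySem.Int.floordiv v rem'), rem')) (cur, rem)).1
      = cur.take k ++ gA index suf rem := by
  intro suf
  induction suf with
  | nil =>
    intro k cur rem hdrop hlen
    have hk : shape.length ≤ k := by
      by_contra hlt
      rw [List.drop_eq_getElem_cons (by omega : k < shape.length)] at hdrop
      simp at hdrop
      omega
    have hempty : PySem.List.pyRange (k : Int) (shape.length : Int) 1 = [] := by
      rw [PySem.List.pyRange_one]
      have : ((shape.length : Int) - (k : Int)).toNat = 0 := by omega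
      simp [this]
    rw [hempty]
    simp [gA, List.take_of_length_le (by omega : cur.length ≤ k)]
  | cons s rest ih =>
    intro k cur rem hdrop hlen
    have hk : k < shape.length := by
      by_contra hge
      rw [List.drop_eq_nil_of_le (by omega)] at hdrop
      simp at hdrop
    rw [List.drop_eq_getElem_cons hk] at hdrop
    have hs : shape[k] = s := (List.cons.injEq _ _ _ _ ▸ hdrop).1
    have hrest : shape.drop (k + 1) = rest := (List.cons.injEq _ _ _ _ ▸ hdrop).2
    rw [PySem.List.pyRange_one_cons (by exact_mod_cast hk)]
    rw [List.foldl_cons]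
    have hcast : (k : Int) + 1 = ((k + 1 : Nat) : Int) := by push_cast; ring
    have hget : PySem.List.pyGetD shape (k : Int) 0 = s := by
      rw [PySem.List.pyGetD_natCast, List.getD_eq_getElem _ _ hk, hs]
    simp only [hget, Int.toNat_natCast, hcast]
    rw [ih (k + 1) _ _ hrest (by simp [hlen])]
    rw [pv_take_set cur k _ (by omega)]
    simp [gA]
theorem pv_A_eq_gA (index : Int) (shape : List Int) :
    indices_of index shape = gA index shape shape.prod := by
  unfold indices_of volume_of
  have h := pv_loopA index shape shape 0 (shape.map fun _ => (0 : Int))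
    (shape.foldl (· * ·) 1) (by simp) (by simp)
  rw [List.prod_eq_foldl]
  simpa using h

-- the strides pass of B: second component is the running suffix product
theorem pv_foldrB_snd (xs : List Int) :
    (xs.foldr (fun x (st : List Int × Int) => (st.1 ++ [st.2], st.2 * x)) ([], 1)).2 = xs.prod := by
  induction xs with
  | nil => simp
  | cons x rest ih =>
    simp only [List.foldr_cons]
    rw [ih, List.prod_cons, mul_comm]

theorem pv_B_cons (index : Int) (s : Int) (rest : List Int) :
    indices_of_alt index (s :: rest)
      = PySem.Int.mod (PySem.Int.floordiv index rest.prod) s :: indices_of_alt index rest := by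
  unfold indices_of_alt
  simp only [List.foldl_reverse]
  rw [List.foldr_cons, pv_foldrB_snd]
  simp

theorem pv_gA_eq_B (index : Int) (shape : List Int) (hpos : ∀ s ∈ shape, 0 < s) :
    gA index shape shape.prod = indices_of_alt index shape := by
  induction shape with
  | nil => simp [gA, indices_of_alt]
  | cons s rest ih =>
    have hs : 0 < s := hpos s (by simp)
    have hP : 0 < rest.prod := List.prod_pos (fun a ha => hpos a (by simp [ha]))
    rw [pv_B_cons]
    simp only [gA, List.prod_cons]
    have hrem' : PySem.Int.floordiv (s * rest.prod) s = rest.prod := by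
      rw [PySem.Int.floordiv_eq_ediv_of_pos hs, Int.mul_ediv_cancel_left _ (by omega)]
    rw [hrem']
    congr 1
    · rw [PySem.Int.mod_eq_emod_of_pos (by positivity),
        PySem.Int.floordiv_eq_ediv_of_pos hP,
        PySem.Int.floordiv_eq_ediv_of_pos hP,
        PySem.Int.mod_eq_emod_of_pos hs]
      exact pv_key index s rest.prod hs hP
    · exact ih (fun a ha => hpos a (by simp [ha]))

-- ===== VERDICT (by name: the statement is the Claim_ definition above) =====
theorem indices_of_spec : Claim_equal_indices_of := by
  intro index shape _ hpre
  unfold Spec_indices_of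
  rw [pv_A_eq_gA, pv_gA_eq_B index shape hpre.1]
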